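-- pv_equiv track=rewrite | github.com/mulinfro/slot_combination | scripts/engine/parse.py | get_list_product_with_slices
-- ===== SOURCE A (Python) =====
-- def count_tag_num(e):
--     if not e: t = 0
--     else:     t = e.count("#") + 1
--     return t
--
-- def get_list_product_with_slices(lst_of_lst):
--     ans = [("", ())]
--     for lst in lst_of_lst:
--         new_ans = []
--         for e, f in ans:
--             for e2 in lst:
--                 if e2 == "": new_ans.append((e, f))
--                 else:        new_ans.append((("%s#%s"%(e, e2)).strip("#"), f + (count_tag_num(e2),) ))
--         ans = new_ans
--     return ans
-- ===== SOURCE B (Python) =====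
-- def count_tag_num(e):
--     if not e: t = 0
--     else:     t = e.count("#") + 1
--     return t
--
-- def get_list_product_with_slices(lst_of_lst):
--     def go(rest, e, f):
--         if not rest:
--             return [(e, f)]
--         out = []
--         for e2 in rest[0]:
--             if e2 == "":
--                 out += go(rest[1:], e, f)
--             else:
--                 out += go(rest[1:], ("%s#%s" % (e, e2)).strip("#"), f + (count_tag_num(e2),))
--         return out
--     return go(lst_of_lst, "", ())
-- ===== Notes on version B (the rewrite author's own statement) =====
-- stated objective: alternative
-- what changed: Replaced the breadth-first frontier (rebuilding the whole ans list once per input list) by a depth-first recursion that carries the partial tag string and count tuple down the lists and concatenates the sub-results.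
import Mathlib
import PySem

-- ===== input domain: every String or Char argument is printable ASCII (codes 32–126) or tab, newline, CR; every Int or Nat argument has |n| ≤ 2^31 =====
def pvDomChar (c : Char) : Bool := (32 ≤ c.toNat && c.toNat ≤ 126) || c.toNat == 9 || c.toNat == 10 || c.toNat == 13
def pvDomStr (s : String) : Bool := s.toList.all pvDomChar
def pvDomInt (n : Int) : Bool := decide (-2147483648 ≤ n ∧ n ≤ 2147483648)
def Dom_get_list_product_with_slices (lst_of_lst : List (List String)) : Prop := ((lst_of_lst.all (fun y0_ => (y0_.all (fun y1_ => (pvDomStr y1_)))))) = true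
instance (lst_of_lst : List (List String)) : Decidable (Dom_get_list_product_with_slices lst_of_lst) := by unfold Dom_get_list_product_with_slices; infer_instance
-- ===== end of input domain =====

-- B replaces A's breadth-first frontier (rebuilding ans once per input list) by a
-- depth-first recursion carrying the partial tag string and counts (objective: alternative).

-- ===== PORT A =====
def pvCountTagNum (e : String) : Int :=
  if e == "" then 0 else (PySem.Str.count e "#" : Int) + 1

def get_list_product_with_slices (lst_of_lst : List (List String)) : List (String × List Int) :=
  lst_of_lst.foldl (fun ans lst =>
    ans.foldl (fun new_ans ef =>
      lst.foldl (fun new_ans e2 =>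
        if e2 == "" then new_ans ++ [(ef.1, ef.2)]
        else new_ans ++ [(PySem.Str.stripChars (ef.1 ++ "#" ++ e2) "#", ef.2 ++ [pvCountTagNum e2])])
        new_ans) []) [("", [])]

-- ===== PORT B =====
def pvGo : List (List String) → String → List Int → List (String × List Int)
  | [], e, f => [(e, f)]
  | lst :: rest, e, f =>
      lst.foldl (fun out e2 =>
        if e2 == "" then out ++ pvGo rest e f
        else out ++ pvGo rest (PySem.Str.stripChars (e ++ "#" ++ e2) "#") (f ++ [pvCountTagNum e2])) []

def get_list_product_with_slices_alt (lst_of_lst : List (List String)) : List (String × List Int) :=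
  pvGo lst_of_lst "" []

-- ===== PRECONDITION & SPEC =====
def Spec_get_list_product_with_slices (lst_of_lst : List (List String)) (out : List (String × List Int)) : Prop := out = get_list_product_with_slices_alt lst_of_lst
instance (lst_of_lst : List (List String)) (out : List (String × List Int)) : Decidable (Spec_get_list_product_with_slices lst_of_lst out) := by unfold Spec_get_list_product_with_slices; infer_instance

-- ===== CLAIM (what is proved, stated in full; the proofs are below) =====
def Claim_equal_get_list_product_with_slices : Prop := ∀ (lst_of_lst : List (List String)), Dom_get_list_product_with_slices lst_of_lst → Spec_get_list_product_with_slices lst_of_lst (get_list_product_with_slices lst_of_lst)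

-- ===== LEMMAS AND PROOFS =====

-- loop shape: 'if p(x): out += g(x) else: out += h(x)'
theorem pvFoldlAppendIte {α β : Type} (p : α → Bool) (g h : α → List β) :
    ∀ (l : List α) (acc : List β),
      l.foldl (fun out x => if p x then out ++ g x else out ++ h x) acc
        = acc ++ l.flatMap (fun x => if p x then g x else h x) := by
  intro l
  induction l with
  | nil => intro acc; simp
  | cons x xs ih =>
      intro acc
      simp only [List.foldl_cons, List.flatMap_cons, ih]
      by_cases hx : p x <;> simp [hx]

-- A's one-round frontier rebuild, expressed as a flatMap
theorem pvStepA_eq (lst : List String) (ans : List (String × List Int)) :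
    ans.foldl (fun new_ans ef =>
      lst.foldl (fun new_ans e2 =>
        if e2 == "" then new_ans ++ [(ef.1, ef.2)]
        else new_ans ++ [(PySem.Str.stripChars (ef.1 ++ "#" ++ e2) "#", ef.2 ++ [pvCountTagNum e2])])
        new_ans) []
    = ans.flatMap (fun ef => lst.flatMap (fun e2 =>
        if e2 == "" then [(ef.1, ef.2)]
        else [(PySem.Str.stripChars (ef.1 ++ "#" ++ e2) "#", ef.2 ++ [pvCountTagNum e2])])) := by
  have hinner : (fun (new_ans : List (String × List Int)) (ef : String × List Int) =>
      lst.foldl (fun new_ans e2 =>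
        if e2 == "" then new_ans ++ [(ef.1, ef.2)]
        else new_ans ++ [(PySem.Str.stripChars (ef.1 ++ "#" ++ e2) "#", ef.2 ++ [pvCountTagNum e2])])
        new_ans)
    = (fun new_ans ef => new_ans ++ lst.flatMap (fun e2 =>
        if e2 == "" then [(ef.1, ef.2)]
        else [(PySem.Str.stripChars (ef.1 ++ "#" ++ e2) "#", ef.2 ++ [pvCountTagNum e2])])) := by
    funext new_ans ef
    exact pvFoldlAppendIte (fun e2 => e2 == "") _ _ lst new_ans
  rw [hinner, PySem.List.foldl_append_eq_flatMap, List.nil_append]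

-- main invariant: the whole frontier loop equals flatMapping the DFS over the frontier
theorem pvLoopA_eq (L : List (List String)) :
    ∀ (ans : List (String × List Int)),
      L.foldl (fun ans lst =>
        ans.foldl (fun new_ans ef =>
          lst.foldl (fun new_ans e2 =>
            if e2 == "" then new_ans ++ [(ef.1, ef.2)]
            else new_ans ++ [(PySem.Str.stripChars (ef.1 ++ "#" ++ e2) "#", ef.2 ++ [pvCountTagNum e2])])
            new_ans) []) ans
      = ans.flatMap (fun p => pvGo L p.1 p.2) := by
  induction L with
  | nil => intro ans; simp [pvGo]
  | cons lst rest ih =>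
      intro ans
      rw [List.foldl_cons, ih, pvStepA_eq, List.flatMap_assoc]
      congr 1
      funext ef
      rw [List.flatMap_assoc]
      have : pvGo (lst :: rest) ef.1 ef.2
          = lst.flatMap (fun e2 =>
              if e2 == "" then pvGo rest ef.1 ef.2
              else pvGo rest (PySem.Str.stripChars (ef.1 ++ "#" ++ e2) "#") (ef.2 ++ [pvCountTagNum e2])) := by
        rw [pvGo]
        exact pvFoldlAppendIte (fun e2 => e2 == "") _ _ lst []
      rw [this]
      congr 1
      funext e2
      by_cases hx : e2 == "" <;> simp [hx]

-- ===== VERDICT (by name: the statement is the Claim_ definition above) =====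
theorem get_list_product_with_slices_spec : Claim_equal_get_list_product_with_slices := by
  intro lst_of_lst _
  unfold Spec_get_list_product_with_slices get_list_product_with_slices get_list_product_with_slices_alt
  rw [pvLoopA_eq]
  simp
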